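-- pv_equiv track=rewrite | github.com/Imeany12/2190101-Computer-Programming | Resource/ToStudent 3/ToStudent 3/New folder/Final_Part1_toStudent.py | get_consensus_generic
-- ===== SOURCE A (Python) =====
-- def co(p):
--     p.sort()
--     d = {}
--     d1 = {}
--     ju = []
--     for x in p:
--         if x not in d:
--             d[x] = 1
--         else:
--             d[x] +=1
--     for x in d:
--         if d[x] not in d1:
--             d1[d[x]] = [x]
--         else:
--             d1[d[x]] +=[x]
--     for x in d1:
--             d1[x].sort()
--     num = [d[e] for e in d]
--     ju.append("/".join(d1[max(num)]))
--     return ju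
--
-- def get_consensus_generic(ss):
--     # write your code here
--     line = ss.split("\n")
--     d = {}
--     k = []
--     for x in line:
--         for y in range(len(x)):
--             if y not in d:
--                 d[y] =  [x[y].upper()]
--             else:
--                 d[y] +=  [x[y].upper()]
--     for x in d:
--         k+=co(d[x])
--     consensus = " ".join(k)
--     return consensus # DO NOT MODIFY THIS LINE
-- ===== SOURCE B (Python) =====
-- def get_consensus_generic(ss):
--     lines = ss.split("\n")
--     width = max((len(x) for x in lines), default=0)
--     parts = []
--     for col in range(width):
--         col_sorted = sorted(x[col].upper() for x in lines if col < len(x))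
--         best = 0
--         run = 0
--         prev = None
--         winners = []
--         for c in col_sorted:
--             run = run + 1 if c == prev else 1
--             prev = c
--             if run > best:
--                 best = run
--                 winners = [c]
--             elif run == best:
--                 winners.append(c)
--         parts.append("/".join(winners))
--     return " ".join(parts)
-- ===== Notes on version B (the rewrite author's own statement) =====
-- stated objective: alternative
-- what changed: B replaces A's counting dict + count-to-chars inverted index + winner sort (the co helper) by a sort-then-scan algorithm: each ragged column is sorted once and a single linear run-length scan over the sorted characters collects the maximal runs, whose characters are the consensus winners already in alphabetical order.
import Mathlib
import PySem

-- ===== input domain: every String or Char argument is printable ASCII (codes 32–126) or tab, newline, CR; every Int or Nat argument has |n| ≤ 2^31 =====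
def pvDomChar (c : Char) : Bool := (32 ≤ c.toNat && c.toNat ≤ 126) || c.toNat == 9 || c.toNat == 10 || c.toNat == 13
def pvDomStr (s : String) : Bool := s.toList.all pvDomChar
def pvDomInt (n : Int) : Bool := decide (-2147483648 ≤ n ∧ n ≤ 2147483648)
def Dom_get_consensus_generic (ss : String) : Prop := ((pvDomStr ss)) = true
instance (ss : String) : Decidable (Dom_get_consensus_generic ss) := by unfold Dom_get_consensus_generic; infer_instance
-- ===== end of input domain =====

-- B replaces A's counting-dict + count→chars inverted index + winner sort (the co helper) by
-- sort-then-scan: each column is sorted once and one linear run-length scan collects the maximal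
-- runs, already in alphabetical order (objective: alternative, same behaviour).

-- ===== PORT A =====
-- co(p): sort, count occurrences, invert to count→chars, sort each bucket, emit the max-count bucket
def pvCo (p : List Char) : List (List Char) :=
  let p := PySem.List.sorted p (fun x => x) false
  let d : PySem.Dict Char Int :=
    p.foldl (fun d x =>
      if d.contains x then d.insert x (d.getD x 0 + 1) else d.insert x 1) PySem.Dict.empty
  let d1 : PySem.Dict Int (List Char) :=
    d.items.foldl (fun d1 q =>
      if d1.contains q.2 then d1.insert q.2 (d1.getD q.2 [] ++ [q.1])
      else d1.insert q.2 [q.1]) PySem.Dict.empty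
  let d1 : PySem.Dict Int (List Char) :=
    PySem.Dict.mk (d1.items.map (fun q => (q.1, PySem.List.sorted q.2 (fun c => c) false)))
  let num : List Int := d.items.map (fun e => d.getD e.1 0)
  match PySem.List.max? num (fun n => n) with
  | some m => [PySem.Chars.join ['/'] ((d1.getD m []).map (fun c => [c]))]
  | none => []   -- unreachable: Python's max([]) would raise, but co is only applied to nonempty columns

def get_consensus_generic (ss : String) : String :=
  let line : List (List Char) := ((PySem.Str.split? ss "\n").getD []).map String.toList
  let d : PySem.Dict Int (List Char) :=
    line.foldl (fun d x =>
      (PySem.List.pyRange 0 (x.length : Int)).foldl (fun d y =>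
        match PySem.List.pyGet? x y with
        | some ch =>
            if d.contains y then d.insert y (d.getD y [] ++ [PySem.Chars.upperChar ch])
            else d.insert y [PySem.Chars.upperChar ch]
        | none => d   -- unreachable: y ∈ range(len(x))
        ) d) PySem.Dict.empty
  let k : List (List Char) := d.items.foldl (fun k q => k ++ pvCo q.2) []
  String.ofList (PySem.Chars.join [' '] k)

-- ===== PORT B =====
-- one step of Source B's run-length scan over the sorted column; state = (best, run, prev, winners)
def pvStep (st : Int × Int × Option Char × List Char) (c : Char) :
    Int × Int × Option Char × List Char :=
  let run : Int := if st.2.2.1 == some c then st.2.1 + 1 else 1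
  if run > st.1 then (run, run, some c, [c])
  else if run == st.1 then (st.1, run, some c, st.2.2.2 ++ [c])
  else (st.1, run, some c, st.2.2.2)

def get_consensus_generic_alt (ss : String) : String :=
  let lines : List (List Char) := ((PySem.Str.split? ss "\n").getD []).map String.toList
  let width : Int := PySem.List.maxD (lines.map (fun x => (x.length : Int))) (fun n => n) 0
  let parts : List (List Char) :=
    (PySem.List.pyRange 0 width).foldl (fun parts col =>
      let colSorted : List Char :=
        PySem.List.sorted
          ((lines.filter (fun x => decide (col < (x.length : Int)))).map
            (fun x => PySem.Chars.upperChar ((PySem.List.pyGet? x col).getD ' ')))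
          (fun c => c) false
      let st := colSorted.foldl pvStep ((0 : Int), (0 : Int), (none : Option Char), ([] : List Char))
      parts ++ [PySem.Chars.join ['/'] (st.2.2.2.map (fun c => [c]))]) []
  String.ofList (PySem.Chars.join [' '] parts)

-- ===== PRECONDITION & SPEC =====
def Spec_get_consensus_generic (ss : String) (out : String) : Prop := out = get_consensus_generic_alt ss
instance (ss : String) (out : String) : Decidable (Spec_get_consensus_generic ss out) := by unfold Spec_get_consensus_generic; infer_instance

-- ===== CLAIM (what is proved, stated in full; the proofs are below) =====
def Claim_equal_get_consensus_generic : Prop := ∀ (ss : String), Dom_get_consensus_generic ss → Spec_get_consensus_generic ss (get_consensus_generic ss)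

-- ===== LEMMAS AND PROOFS =====

-- The chars of column `c` (uppercased), in line order — B's per-column list.
def pvColumn (lines : List (List Char)) (c : Int) : List Char :=
  (lines.filter (fun x => decide (c < (x.length : Int)))).map
    (fun x => PySem.Chars.upperChar ((PySem.List.pyGet? x c).getD ' '))

-- A's per-column consensus (count-based max/filter canonical form).
def pvSelect (column : List Char) : List Char :=
  let m : Int := PySem.List.maxD (column.map (fun c => (column.count c : Int))) (fun n => n) 0
  PySem.Chars.join ['/']
    ((PySem.List.sorted
        (PySem.Set.ofList (column.filter (fun c => ((column.count c : Int) == m))))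
        (fun c => c) false).map (fun c => [c]))

-- the number of columns: the length of the longest line
def pvWidth (lines : List (List Char)) : Nat := (lines.map List.length).foldl max 0

-- the maximal multiplicity of an element of s
def pvMN (s : List Char) : Nat := (s.map (fun x => s.count x)).foldl max 0

theorem pvInner_eq_modify (x : List Char) (d : PySem.Dict Int (List Char)) :
    (PySem.List.pyRange 0 (x.length : Int)).foldl (fun d y =>
        match PySem.List.pyGet? x y with
        | some ch =>
            if d.contains y then d.insert y (d.getD y [] ++ [PySem.Chars.upperChar ch])
            else d.insert y [PySem.Chars.upperChar ch]
        | none => d) d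
    = (PySem.List.pyRange 0 (x.length : Int)).foldl (fun d y =>
        d.modify y [] (· ++ [PySem.Chars.upperChar ((PySem.List.pyGet? x y).getD ' ')])) d := by
  apply PySem.List.foldl_congr_mem'
  intro y hy dd
  rw [PySem.List.mem_pyRange_one] at hy
  obtain ⟨n, rfl⟩ := Int.eq_ofNat_of_zero_le hy.1
  have hn : n < x.length := by exact_mod_cast hy.2
  have hg : PySem.List.pyGet? x (n : Int) = some (x[n]'hn) := by
    simp [PySem.List.pyGet?_natCast, List.getElem?_eq_getElem hn]
  rw [hg]
  simp only [Option.getD_some, PySem.Dict.modify]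
  by_cases hc : dd.contains (n : Int)
  · simp [hc]
  · simp [hc, PySem.Dict.getD_of_not_contains _ _ (by simpa using hc)]

theorem pvModifyFold_getD (x : List Char) (g : Int → Char) (d : PySem.Dict Int (List Char)) (col : Nat) :
    ((PySem.List.pyRange 0 (x.length : Int)).foldl (fun d y => d.modify y [] (· ++ [g y])) d).getD (col : Int) []
    = d.getD (col : Int) [] ++ (if col < x.length then [g (col : Int)] else []) := by
  have h1 : (PySem.List.pyRange 0 (x.length : Int)).foldl (fun d y => d.modify y [] (· ++ [g y])) d
      = ((PySem.List.pyRange 0 (x.length : Int)).map (fun y => (y, g y))).foldl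
          (fun d p => d.modify p.1 [] (· ++ [p.2])) d := by
    rw [List.foldl_map]
  rw [h1, PySem.Dict.getD_foldl_modify_append]
  congr 1
  rw [PySem.List.pyRange_zero_natCast, List.map_map, List.filter_map, List.map_map]
  have h2 : List.filter ((fun p => p.1 == ((col : Nat) : Int)) ∘ (fun y => (y, g y)) ∘ fun k : Nat => (k : Int))
        (List.range x.length)
      = List.filter (fun k => k == col) (List.range x.length) := by
    apply List.filter_congr
    intro k _
    simp
  rw [h2]
  have h3 : (List.range x.length).filter (fun k => k == col)
      = if col < x.length then [col] else [] := by
    rw [List.filter_beq, List.count_range]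
    split_ifs <;> simp
  rw [h3]
  split_ifs <;> simp

theorem pvBuild_getD (lines : List (List Char)) (col : Nat) (d : PySem.Dict Int (List Char)) :
    (lines.foldl (fun d x =>
      (PySem.List.pyRange 0 (x.length : Int)).foldl (fun d y =>
        match PySem.List.pyGet? x y with
        | some ch =>
            if d.contains y then d.insert y (d.getD y [] ++ [PySem.Chars.upperChar ch])
            else d.insert y [PySem.Chars.upperChar ch]
        | none => d) d) d).getD (col : Int) []
    = d.getD (col : Int) [] ++ pvColumn lines (col : Int) := by
  induction lines generalizing d with
  | nil => simp [pvColumn]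
  | cons x ls ih =>
      rw [List.foldl_cons, ih, pvInner_eq_modify, pvModifyFold_getD]
      have hcast : (decide ((col : Int) < (x.length : Int))) = decide (col < x.length) := by
        simp
      simp only [pvColumn, List.filter_cons, hcast]
      by_cases h : col < x.length
      · simp [h]
      · simp [h]

theorem pvSetUpdate_range (a b : Nat) :
    PySem.Set.update (List.map Int.ofNat (List.range a)) (List.map Int.ofNat (List.range b))
    = List.map Int.ofNat (List.range (max a b)) := by
  induction b with
  | zero => simp [PySem.Set.update]
  | succ b ih =>
      rw [List.range_succ, List.map_append]
      have hu : ∀ (s : PySem.Set Int) (l : List Int) (x : Int),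
          PySem.Set.update s (l ++ [x]) = PySem.Set.add (PySem.Set.update s l) x := by
        intro s l x
        simp [PySem.Set.update, List.foldl_append]
      rw [List.map_singleton, hu, ih]
      by_cases h : b < a
      · have hc : PySem.Set.contains (List.map Int.ofNat (List.range (max a b))) (Int.ofNat b) = true := by
          simp only [PySem.Set.contains, List.contains_iff_mem, List.mem_map]
          exact ⟨b, List.mem_range.mpr (by omega), rfl⟩
        rw [PySem.Set.add, hc]
        simp only [if_true]
        congr 2
        omega
      · have hc : PySem.Set.contains (List.map Int.ofNat (List.range (max a b))) (Int.ofNat b) = false := by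
          simp only [PySem.Set.contains, List.contains_eq_mem, decide_eq_false_iff_not, List.mem_map]
          rintro ⟨k, hk, hkb⟩
          rw [List.mem_range] at hk
          have : k = b := Int.ofNat.inj hkb
          omega
        rw [PySem.Set.add, hc]
        simp only [Bool.false_eq_true, if_false]
        have h1 : max a b = b := by omega
        have h2 : max a (b + 1) = b + 1 := by omega
        rw [h1, h2, List.range_succ, List.map_append, List.map_singleton]

theorem pvBuild_keys_gen (lines : List (List Char)) (d : PySem.Dict Int (List Char)) (a : Nat)
    (h : d.keys = List.map Int.ofNat (List.range a)) :
    (lines.foldl (fun d x =>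
      (PySem.List.pyRange 0 (x.length : Int)).foldl (fun d y =>
        match PySem.List.pyGet? x y with
        | some ch =>
            if d.contains y then d.insert y (d.getD y [] ++ [PySem.Chars.upperChar ch])
            else d.insert y [PySem.Chars.upperChar ch]
        | none => d) d) d).keys
    = List.map Int.ofNat (List.range ((lines.map List.length).foldl max a)) := by
  induction lines generalizing d a with
  | nil => simpa using h
  | cons x ls ih =>
      rw [List.foldl_cons, List.map_cons, List.foldl_cons]
      apply ih _ (max a x.length)
      rw [pvInner_eq_modify]
      rw [PySem.Dict.keys_foldl_modify (f := fun _ y v => v ++ [PySem.Chars.upperChar ((PySem.List.pyGet? x y).getD ' ')])]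
      rw [h, PySem.List.pyRange_zero_natCast]
      have : List.map (fun k : Nat => (k : Int)) (List.range x.length)
           = List.map Int.ofNat (List.range x.length) := by simp
      rw [this, pvSetUpdate_range]

theorem pvWidth_eq (lines : List (List Char)) :
    PySem.List.maxD (lines.map (fun x => (x.length : Int))) (fun n => n) 0 = (pvWidth lines : Int) := by
  rcases lines with _ | ⟨x, ls⟩
  · simp [PySem.List.maxD, PySem.List.max?, pvWidth]
  · set L := (x :: ls : List (List Char))
    have hne : L.map (fun x => (x.length : Int)) ≠ [] := by simp [L]
    obtain ⟨M, hM⟩ : ∃ M, PySem.List.max? (L.map (fun x => (x.length : Int))) (fun n => n) = some M := by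
      rcases h : PySem.List.max? (L.map (fun x => (x.length : Int))) (fun n => n) with _ | M
      · exact absurd ((PySem.List.max?_eq_none_iff _ _).1 h) hne
      · exact ⟨M, h⟩
    have hmem := PySem.List.max?_mem hM
    have hmax := PySem.List.max?_isMax hM
    rw [PySem.List.maxD, hM, Option.getD_some]
    obtain ⟨y, hy, rfl⟩ := List.mem_map.1 hmem
    have hb := PySem.List.le_foldl_max (L.map List.length) 0
    have h1 : y.length ≤ pvWidth L := hb.2 _ (List.mem_map_of_mem hy)
    have h2 : (pvWidth L : Int) ≤ (y.length : Int) := by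
      rcases PySem.List.foldl_max_mem (L.map List.length) 0 with h0 | hmem2
      · rw [pvWidth, h0]; exact_mod_cast Nat.zero_le _
      · obtain ⟨z, hz, hzl⟩ := List.mem_map.1 hmem2
        have : ((pvWidth L : Nat) : Int) ∈ L.map (fun x => (x.length : Int)) :=
          List.mem_map.2 ⟨z, hz, by rw [hzl, pvWidth]⟩
        exact hmax _ this
    omega

theorem pvColumn_ne_nil (lines : List (List Char)) (col : Nat) (h : col < pvWidth lines) :
    pvColumn lines (col : Int) ≠ [] := by
  rcases PySem.List.foldl_max_mem (lines.map List.length) 0 with h0 | hmem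
  · rw [pvWidth, h0] at h; omega
  · obtain ⟨x, hx, hxl⟩ := List.mem_map.1 hmem
    have hcol : col < x.length := by rw [pvWidth] at h; omega
    intro hnil
    rw [pvColumn, List.map_eq_nil_iff, List.filter_eq_nil_iff] at hnil
    exact absurd (by exact_mod_cast hcol) (by simpa using hnil x hx)

theorem pvGetD_mapped_values (l : List (Int × List Char)) (f : List Char → List Char) (M : Int) :
    (PySem.Dict.mk (l.map (fun q => (q.1, f q.2)))).get? M = ((PySem.Dict.mk l).get? M).map f := by
  induction l with
  | nil => simp [PySem.Dict.get?]
  | cons q t ih =>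
      rw [List.map_cons, PySem.Dict.get?_mk_cons, PySem.Dict.get?_mk_cons]
      by_cases h : q.1 == M
      · simp [h]
      · simp only [h, Bool.false_eq_true, if_false]; exact ih

theorem pvCo_eq_select (p : List Char) (hp : p ≠ []) : pvCo p = [pvSelect p] := by
  simp only [pvCo, pvSelect]
  set p' := PySem.List.sorted p (fun x => x) false with hp'
  have hperm : p'.Perm p := PySem.List.sorted_perm p (fun x => x) false
  have hp'ne : p' ≠ [] := by
    intro h
    have h2 := hperm
    rw [h] at h2
    exact hp h2.symm.eq_nil
  have hd : p'.foldl (fun d x =>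
      if d.contains x then d.insert x (d.getD x 0 + 1) else d.insert x 1) PySem.Dict.empty
      = PySem.Dict.counter p' := by
    rw [← PySem.Dict.foldl_insert_getD_add_one_eq_counter]
    apply PySem.List.foldl_congr_mem'
    intro x _ d
    by_cases h : d.contains x
    · simp [h]
    · rw [if_neg (by simp [h]), PySem.Dict.getD_of_not_contains _ _ (by simpa using h)]
      norm_num
  rw [hd]
  have hnum : (PySem.Dict.counter p').items.map (fun e => (PySem.Dict.counter p').getD e.1 0)
      = (PySem.Set.ofList p').map (fun k => ((p'.count k : Nat) : Int)) := by
    rw [PySem.Dict.items_counter, List.map_map]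
    apply List.map_congr_left
    intro k _
    simp [PySem.Dict.getD_counter]
  rw [hnum]
  have hsne : PySem.Set.ofList p' ≠ [] := by
    rcases List.exists_mem_of_ne_nil _ hp'ne with ⟨c, hc⟩
    intro h
    exact absurd ((PySem.Set.mem_ofList p' c).2 hc) (by simp [h])
  obtain ⟨M, hM⟩ : ∃ M, PySem.List.max? ((PySem.Set.ofList p').map (fun k => ((p'.count k : Nat) : Int))) (fun n => n) = some M := by
    rcases h : PySem.List.max? ((PySem.Set.ofList p').map (fun k => ((p'.count k : Nat) : Int))) (fun n => n) with _ | M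
    · exact absurd ((PySem.List.max?_eq_none_iff _ _).1 h) (by simpa using hsne)
    · exact ⟨M, rfl⟩
  rw [hM]
  obtain ⟨M', hM'⟩ : ∃ M', PySem.List.max? (p.map (fun c => ((p.count c : Nat) : Int))) (fun n => n) = some M' := by
    rcases h : PySem.List.max? (p.map (fun c => ((p.count c : Nat) : Int))) (fun n => n) with _ | M'
    · exact absurd ((PySem.List.max?_eq_none_iff _ _).1 h) (by simpa using hp)
    · exact ⟨M', rfl⟩
  have hcnt : ∀ c, p'.count c = p.count c := fun c => hperm.count_eq c
  have hMM' : M = M' := by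
    have h1 := PySem.List.max?_isMax hM
    have h2 := PySem.List.max?_isMax hM'
    have hm1 := PySem.List.max?_mem hM
    have hm2 := PySem.List.max?_mem hM'
    obtain ⟨k, hk, rfl⟩ := List.mem_map.1 hm1
    obtain ⟨c, hc, hceq⟩ := List.mem_map.1 hm2
    have hkp : k ∈ p := hperm.mem_iff.1 ((PySem.Set.mem_ofList p' k).1 hk)
    have hle1 : ((p'.count k : Nat) : Int) ≤ M' := by
      have : ((p.count k : Nat) : Int) ∈ p.map (fun c => ((p.count c : Nat) : Int)) :=
        List.mem_map.2 ⟨k, hkp, rfl⟩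
      rw [hcnt]; exact h2 _ this
    have hle2 : M' ≤ ((p'.count k : Nat) : Int) := by
      have hcs : c ∈ PySem.Set.ofList p' := (PySem.Set.mem_ofList p' c).2 (hperm.mem_iff.2 hc)
      have : ((p'.count c : Nat) : Int) ∈ (PySem.Set.ofList p').map (fun k => ((p'.count k : Nat) : Int)) :=
        List.mem_map.2 ⟨c, hcs, rfl⟩
      rw [← hceq, ← hcnt]
      exact h1 _ this
    omega
  have hmB : PySem.List.maxD (p.map (fun c => ((p.count c : Nat) : Int))) (fun n => n) 0 = M := by
    rw [PySem.List.maxD, hM', Option.getD_some, hMM']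
  rw [hmB]
  have hd1 : (PySem.Dict.counter p').items.foldl (fun d1 q =>
      if d1.contains q.2 then d1.insert q.2 (d1.getD q.2 [] ++ [q.1])
      else d1.insert q.2 [q.1]) PySem.Dict.empty
      = ((PySem.Dict.counter p').items.map Prod.swap).foldl
          (fun d1 q => d1.modify q.1 [] (· ++ [q.2])) PySem.Dict.empty := by
    rw [List.foldl_map]
    apply PySem.List.foldl_congr_mem'
    intro q _ d1
    by_cases h : d1.contains q.2
    · simp [h, PySem.Dict.modify, Prod.swap]
    · rw [if_neg (by simp [h])]
      simp [PySem.Dict.modify, Prod.swap, PySem.Dict.getD_of_not_contains _ _ (by simpa using h)]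
  have hbucket : (((PySem.Dict.counter p').items.map Prod.swap).foldl
          (fun d1 q => d1.modify q.1 [] (· ++ [q.2])) PySem.Dict.empty).getD M []
      = (PySem.Set.ofList p').filter (fun k => (((p'.count k : Nat) : Int) == M)) := by
    rw [PySem.Dict.getD_foldl_modify_append]
    rw [PySem.Dict.getD_empty, List.nil_append, PySem.Dict.items_counter, List.map_map,
        List.filter_map, List.map_map]
    have : ((fun q : Int × Char => q.1 == M) ∘ Prod.swap ∘ fun k : Char => (k, ((p'.count k : Nat) : Int)))
        = fun k : Char => (((p'.count k : Nat) : Int) == M) := by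
      funext k; rfl
    rw [this]
    have h22 : ((fun x : Int × Char => x.2) ∘ Prod.swap ∘ fun k : Char => (k, ((p'.count k : Nat) : Int)))
        = fun k : Char => k := rfl
    rw [h22, List.map_id']
  have hlookup : ∀ (draw : PySem.Dict Int (List Char)),
      (PySem.Dict.mk (draw.items.map (fun q => (q.1, PySem.List.sorted q.2 (fun c => c) false)))).getD M []
      = PySem.List.sorted (draw.getD M []) (fun c => c) false := by
    intro draw
    rw [PySem.Dict.getD_eq_get?_getD, PySem.Dict.getD_eq_get?_getD]
    have hmk : PySem.Dict.mk draw.items = draw := rfl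
    rw [pvGetD_mapped_values draw.items (fun v => PySem.List.sorted v (fun c => c) false) M, hmk]
    rcases draw.get? M with _ | v
    · rfl
    · rfl
  split
  next m hm =>
    obtain rfl : M = m := Option.some.inj hm
    rw [hd1, hlookup, hbucket]
    have hsorted : PySem.List.sorted
          ((PySem.Set.ofList p').filter (fun k => (((p'.count k : Nat) : Int) == M))) (fun c => c) false
        = PySem.List.sorted
          (PySem.Set.ofList (p.filter (fun c => (((p.count c : Nat) : Int) == M)))) (fun c => c) false := by
      apply PySem.List.sorted_eq_sorted_of_perm _ _ _ (fun a b h => h)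
      rw [List.perm_ext_iff_of_nodup ((PySem.Set.nodup_ofList p').filter _) (PySem.Set.nodup_ofList _)]
      intro a
      rw [List.mem_filter, PySem.Set.mem_ofList, PySem.Set.mem_ofList, List.mem_filter,
          hperm.mem_iff, hcnt]
    rw [hsorted]
  next hm => exact absurd hm (by simp)

-- ===== new lemmas for B's run-length scan =====

theorem pvCount_concat (s : List Char) (c x : Char) :
    (s ++ [c]).count x = s.count x + (if x = c then 1 else 0) := by
  rw [List.count_append]
  by_cases h : x = c
  · simp [h]
  · have h2 : ¬ c = x := fun hh => h hh.symm
    simp [h, h2]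

theorem pvMN_le (s : List Char) : ∀ x ∈ s, s.count x ≤ pvMN s := by
  intro x hx
  exact (PySem.List.le_foldl_max (s.map (fun x => s.count x)) 0).2 _ (List.mem_map_of_mem hx)

theorem pvMN_exists (s : List Char) (h : s ≠ []) : ∃ x ∈ s, s.count x = pvMN s := by
  rcases PySem.List.foldl_max_mem (s.map (fun x => s.count x)) 0 with h0 | hm
  · obtain ⟨x, hx⟩ := List.exists_mem_of_ne_nil s h
    have h1 : 0 < s.count x := List.count_pos_iff.mpr hx
    have h2 := pvMN_le s x hx
    have h3 : pvMN s = 0 := h0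
    omega
  · obtain ⟨x, hx, hcx⟩ := List.mem_map.1 hm
    exact ⟨x, hx, hcx⟩

theorem pvMN_eq (s : List Char) (n : Nat) (h1 : ∀ x ∈ s, s.count x ≤ n)
    (h2 : ∃ x ∈ s, s.count x = n) : pvMN s = n := by
  obtain ⟨y, hy, hyn⟩ := h2
  have hub : n ≤ pvMN s := hyn ▸ pvMN_le s y hy
  have hlb : pvMN s ≤ n := by
    rcases PySem.List.foldl_max_mem (s.map (fun x => s.count x)) 0 with h0 | hm
    · have h3 : pvMN s = 0 := h0
      omega
    · obtain ⟨x, hx, hcx⟩ := List.mem_map.1 hm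
      have hpx : pvMN s = s.count x := hcx.symm
      rw [hpx]
      exact h1 x hx
  omega

-- invariant of Source B's scan: over a sorted nonempty list it tracks (max count, trailing run,
-- last char, the set of max-count chars in increasing order)
theorem pvScan_inv : ∀ (s : List Char) (c : Char),
    ((s ++ [c]).Pairwise (· ≤ ·)) →
    ∃ W : List Char,
      (s ++ [c]).foldl pvStep ((0 : Int), (0 : Int), (none : Option Char), ([] : List Char)) =
        ((pvMN (s ++ [c]) : Int), (((s ++ [c]).count c : Nat) : Int), some c, W) ∧
      W.Pairwise (· < ·) ∧
      (∀ z : Char, z ∈ W ↔ z ∈ s ++ [c] ∧ (s ++ [c]).count z = pvMN (s ++ [c])) := by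
  intro s
  induction s using List.reverseRecOn with
  | nil =>
      intro c _
      have hMN : pvMN ([] ++ [c]) = 1 := by apply pvMN_eq <;> simp
      refine ⟨[c], ?_, by simp, ?_⟩
      · rw [hMN]
        simp [pvStep]
      · intro z
        rw [hMN]
        constructor
        · intro hz
          simp only [List.mem_singleton] at hz
          subst hz
          simp
        · intro ⟨hz, _⟩
          simpa using hz
  | append_singleton t b ih =>
      intro c hs
      have hss : (t ++ [b]).Pairwise (· ≤ ·) :=
        List.Pairwise.sublist (List.sublist_append_left _ _) hs
      have hall : ∀ z ∈ t ++ [b], z ≤ c := by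
        intro z hz
        exact (List.pairwise_append.mp hs).2.2 z hz c (by simp)
      obtain ⟨W, hfold, hWlt, hWmem⟩ := ih b hss
      have hfold2 : ((t ++ [b]) ++ [c]).foldl pvStep
            ((0 : Int), (0 : Int), (none : Option Char), ([] : List Char))
          = pvStep ((pvMN (t ++ [b]) : Int), (((t ++ [b]).count b : Nat) : Int), some b, W) c := by
        rw [List.foldl_append, hfold]
        rfl
      have hbmem : b ∈ t ++ [b] := by simp
      set s := t ++ [b] with hsdef
      set M := pvMN s with hMdef
      have hcntM : s.count b ≤ M := pvMN_le s b hbmem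
      have hcntb1 : 1 ≤ s.count b := List.count_pos_iff.mpr hbmem
      have hWsub : ∀ w ∈ W, w ∈ s ∧ s.count w = M := fun w hw => (hWmem w).1 hw
      have hles : ∀ w ∈ s, w ≤ b := by
        intro w hw
        rcases List.mem_append.1 hw with h | h
        · exact (List.pairwise_append.mp hss).2.2 w h b (by simp)
        · simp only [List.mem_singleton] at h
          exact le_of_eq h
      by_cases hcb : b = c
      · subst c
        have hccb : (s ++ [b]).count b = s.count b + 1 := by
          rw [pvCount_concat, if_pos rfl]
        have hcoth : ∀ z, z ≠ b → (s ++ [b]).count z = s.count z := by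
          intro z hz
          rw [pvCount_concat, if_neg hz, Nat.add_zero]
        by_cases h1 : s.count b = M
        · -- new run exceeds the old max: unique winner
          have hMN' : pvMN (s ++ [b]) = M + 1 := by
            apply pvMN_eq
            · intro z hz
              by_cases hzb : z = b
              · subst hzb
                rw [hccb]
                omega
              · rw [hcoth z hzb]
                have hzs : z ∈ s := by
                  rcases List.mem_append.1 hz with h | h
                  · exact h
                  · simp only [List.mem_singleton] at h
                    exact absurd h hzb
                have := pvMN_le s z hzs
                omega
            · exact ⟨b, by simp, by rw [hccb]; omega⟩
          refine ⟨[b], ?_, by simp, ?_⟩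
          · rw [hfold2]
            simp only [pvStep, beq_self_eq_true, if_true]
            rw [if_pos (by omega : ((s.count b : Int) + 1 > (M : Int)))]
            rw [hMN', hccb, h1]
            push_cast
            rfl
          · intro z
            simp only [List.mem_singleton]
            constructor
            · intro hz
              subst hz
              exact ⟨by simp, by rw [hccb, hMN']; omega⟩
            · rintro ⟨hz, hcz⟩
              by_contra hne
              rw [hcoth z hne, hMN'] at hcz
              have hzs : z ∈ s := by
                rcases List.mem_append.1 hz with h | h
                · exact h
                · simp only [List.mem_singleton] at h
                  exact absurd h hne
              have := pvMN_le s z hzs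
              omega
        · by_cases h2 : s.count b + 1 = M
          · -- run reaches the max: b joins the winners
            have hMN' : pvMN (s ++ [b]) = M := by
              apply pvMN_eq
              · intro z hz
                by_cases hzb : z = b
                · subst hzb
                  rw [hccb]
                  omega
                · rw [hcoth z hzb]
                  have hzs : z ∈ s := by
                    rcases List.mem_append.1 hz with h | h
                    · exact h
                    · simp only [List.mem_singleton] at h
                      exact absurd h hzb
                  have := pvMN_le s z hzs
                  omega
              · exact ⟨b, by simp, by rw [hccb]; omega⟩
            have hWnb : ∀ w ∈ W, w < b := by
              intro w hw
              obtain ⟨hws, hwc⟩ := hWsub w hw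
              refine lt_of_le_of_ne (hles w hws) ?_
              intro he
              subst he
              omega
            refine ⟨W ++ [b], ?_, ?_, ?_⟩
            · rw [hfold2]
              simp only [pvStep, beq_self_eq_true, if_true]
              rw [if_neg (by omega : ¬ ((s.count b : Int) + 1 > (M : Int)))]
              rw [if_pos (by simp only [beq_iff_eq]; omega :
                    (((s.count b : Nat) : Int) + 1 == (M : Int)) = true)]
              rw [hMN', hccb]
              push_cast
              rfl
            · rw [List.pairwise_append]
              exact ⟨hWlt, by simp, fun w hw b' hb' => by
                simp only [List.mem_singleton] at hb'
                subst hb'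
                exact hWnb w hw⟩
            · intro z
              rw [List.mem_append, List.mem_singleton, hWmem z, hMN']
              constructor
              · rintro (⟨hzs, hzc⟩ | rfl)
                · have hznb : z ≠ b := by
                    intro he
                    subst he
                    omega
                  exact ⟨List.mem_append.2 (Or.inl hzs), by rw [hcoth z hznb]; omega⟩
                · exact ⟨by simp, by rw [hccb]; omega⟩
              · rintro ⟨hz, hzc⟩
                by_cases hzb : z = b
                · exact Or.inr hzb
                · left
                  have hzs : z ∈ s := by
                    rcases List.mem_append.1 hz with h | h
                    · exact h
                    · simp only [List.mem_singleton] at h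
                      exact absurd h hzb
                  rw [hcoth z hzb] at hzc
                  exact ⟨hzs, by omega⟩
          · -- run stays below the max: winners unchanged
            have hMN' : pvMN (s ++ [b]) = M := by
              apply pvMN_eq
              · intro z hz
                by_cases hzb : z = b
                · subst hzb
                  rw [hccb]
                  omega
                · rw [hcoth z hzb]
                  have hzs : z ∈ s := by
                    rcases List.mem_append.1 hz with h | h
                    · exact h
                    · simp only [List.mem_singleton] at h
                      exact absurd h hzb
                  have := pvMN_le s z hzs
                  omega
              · obtain ⟨y, hy, hyc⟩ := pvMN_exists s (by simp [hsdef])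
                have hynb : y ≠ b := by
                  intro he
                  subst he
                  omega
                exact ⟨y, List.mem_append.2 (Or.inl hy), by rw [hcoth y hynb]; omega⟩
            refine ⟨W, ?_, hWlt, ?_⟩
            · rw [hfold2]
              simp only [pvStep, beq_self_eq_true, if_true]
              rw [if_neg (by omega : ¬ ((s.count b : Int) + 1 > (M : Int)))]
              rw [if_neg (by simp only [beq_iff_eq]; omega :
                    ¬ ((((s.count b : Nat) : Int) + 1 == (M : Int)) = true))]
              rw [hMN', hccb]
              push_cast
              rfl
            · intro z
              rw [hWmem z, hMN']
              constructor
              · rintro ⟨hzs, hzc⟩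
                have hznb : z ≠ b := by
                  intro he
                  subst he
                  omega
                exact ⟨List.mem_append.2 (Or.inl hzs), by rw [hcoth z hznb]; omega⟩
              · rintro ⟨hz, hzc⟩
                by_cases hzb : z = b
                · subst hzb
                  rw [hccb] at hzc
                  omega
                · have hzs : z ∈ s := by
                    rcases List.mem_append.1 hz with h | h
                    · exact h
                    · simp only [List.mem_singleton] at h
                      exact absurd h hzb
                  rw [hcoth z hzb] at hzc
                  exact ⟨hzs, by omega⟩
      · -- new, strictly larger character: run restarts at 1
        have hbc : b < c := lt_of_le_of_ne (hall b hbmem) hcb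
        have hcns : c ∉ s := by
          intro hc
          exact absurd (hles c hc) (not_le.mpr hbc)
        have hcc : (s ++ [c]).count c = 1 := by
          rw [pvCount_concat, if_pos rfl, List.count_eq_zero_of_not_mem hcns]
        have hcoth : ∀ z, z ≠ c → (s ++ [c]).count z = s.count z := by
          intro z hz
          rw [pvCount_concat, if_neg hz, Nat.add_zero]
        have hMge1 : 1 ≤ M := le_trans hcntb1 hcntM
        by_cases h1 : M = 1
        · -- every count is 1: c joins the winners
          have hMN' : pvMN (s ++ [c]) = 1 := by
            apply pvMN_eq
            · intro z hz
              by_cases hzc : z = c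
              · subst hzc
                rw [hcc]
              · rw [hcoth z hzc]
                have hzs : z ∈ s := by
                  rcases List.mem_append.1 hz with h | h
                  · exact h
                  · simp only [List.mem_singleton] at h
                    exact absurd h hzc
                have := pvMN_le s z hzs
                omega
            · exact ⟨c, by simp, hcc⟩
          have hWnc : ∀ w ∈ W, w < c := by
            intro w hw
            obtain ⟨hws, _⟩ := hWsub w hw
            exact lt_of_lt_of_le' hbc (hles w hws)
          refine ⟨W ++ [c], ?_, ?_, ?_⟩
          · rw [hfold2]
            simp only [pvStep]
            rw [if_neg (by simp [hcb] : ¬ ((some b == some c) = true))]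
            rw [if_neg (by omega : ¬ ((1 : Int) > (M : Int)))]
            rw [if_pos (by simp only [beq_iff_eq]; omega : (((1 : Int)) == (M : Int)) = true)]
            rw [hMN', hcc, h1]
            push_cast
            rfl
          · rw [List.pairwise_append]
            exact ⟨hWlt, by simp, fun w hw c' hc' => by
              simp only [List.mem_singleton] at hc'
              subst hc'
              exact hWnc w hw⟩
          · intro z
            rw [List.mem_append, List.mem_singleton, hWmem z, hMN', h1]
            constructor
            · rintro (⟨hzs, hzc⟩ | rfl)
              · have hznc : z ≠ c := fun he => hcns (he ▸ hzs)
                exact ⟨List.mem_append.2 (Or.inl hzs), by rw [hcoth z hznc]; omega⟩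
              · exact ⟨by simp, hcc⟩
            · rintro ⟨hz, hzc⟩
              by_cases hzc2 : z = c
              · exact Or.inr hzc2
              · left
                have hzs : z ∈ s := by
                  rcases List.mem_append.1 hz with h | h
                  · exact h
                  · simp only [List.mem_singleton] at h
                    exact absurd h hzc2
                rw [hcoth z hzc2] at hzc
                exact ⟨hzs, by omega⟩
        · -- max stays above 1: winners unchanged
          have hM2 : 2 ≤ M := by omega
          have hMN' : pvMN (s ++ [c]) = M := by
            apply pvMN_eq
            · intro z hz
              by_cases hzc : z = c
              · subst hzc
                rw [hcc]
                omega
              · rw [hcoth z hzc]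
                have hzs : z ∈ s := by
                  rcases List.mem_append.1 hz with h | h
                  · exact h
                  · simp only [List.mem_singleton] at h
                    exact absurd h hzc
                have := pvMN_le s z hzs
                omega
            · obtain ⟨y, hy, hyc⟩ := pvMN_exists s (by simp [hsdef])
              have hync : y ≠ c := fun he => hcns (he ▸ hy)
              exact ⟨y, List.mem_append.2 (Or.inl hy), by rw [hcoth y hync]; omega⟩
          refine ⟨W, ?_, hWlt, ?_⟩
          · rw [hfold2]
            simp only [pvStep]
            rw [if_neg (by simp [hcb] : ¬ ((some b == some c) = true))]
            rw [if_neg (by omega : ¬ ((1 : Int) > (M : Int)))]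
            rw [if_neg (by simp only [beq_iff_eq]; omega : ¬ (((1 : Int)) == (M : Int)) = true)]
            rw [hMN', hcc]
            push_cast
            rfl
          · intro z
            rw [hWmem z, hMN']
            constructor
            · rintro ⟨hzs, hzc⟩
              have hznc : z ≠ c := fun he => hcns (he ▸ hzs)
              exact ⟨List.mem_append.2 (Or.inl hzs), by rw [hcoth z hznc]; omega⟩
            · rintro ⟨hz, hzc⟩
              by_cases hzc2 : z = c
              · subst hzc2
                rw [hcc] at hzc
                omega
              · have hzs : z ∈ s := by
                  rcases List.mem_append.1 hz with h | h
                  · exact h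
                  · simp only [List.mem_singleton] at h
                    exact absurd h hzc2
                rw [hcoth z hzc2] at hzc
                exact ⟨hzs, by omega⟩

-- A's count-based max as an Int equals the Nat maximum multiplicity
theorem pvMaxD_eq (p : List Char) (hp : p ≠ []) :
    PySem.List.maxD (p.map (fun c => ((p.count c : Nat) : Int))) (fun n => n) 0 = (pvMN p : Int) := by
  obtain ⟨M, hM⟩ : ∃ M, PySem.List.max? (p.map (fun c => ((p.count c : Nat) : Int))) (fun n => n) = some M := by
    rcases h : PySem.List.max? (p.map (fun c => ((p.count c : Nat) : Int))) (fun n => n) with _ | M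
    · exact absurd ((PySem.List.max?_eq_none_iff _ _).1 h) (by simpa using hp)
    · exact ⟨M, rfl⟩
  rw [PySem.List.maxD, hM, Option.getD_some]
  obtain ⟨y, hy, rfl⟩ := List.mem_map.1 (PySem.List.max?_mem hM)
  have hmax := PySem.List.max?_isMax hM
  have : pvMN p = p.count y := by
    apply pvMN_eq
    · intro x hx
      have := hmax _ (List.mem_map.2 ⟨x, hx, rfl⟩)
      exact_mod_cast this
    · exact ⟨y, hy, rfl⟩
  rw [this]

-- the scanned winners are exactly A's sorted max-count characters
theorem pvScan_winners (p : List Char) (hp : p ≠ []) :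
    PySem.List.sorted
      (PySem.Set.ofList (p.filter (fun c => (((p.count c : Nat) : Int) ==
        PySem.List.maxD (p.map (fun c => ((p.count c : Nat) : Int))) (fun n => n) 0))))
      (fun c => c) false
    = ((PySem.List.sorted p (fun c => c) false).foldl pvStep
        ((0 : Int), (0 : Int), (none : Option Char), ([] : List Char))).2.2.2 := by
  set s := PySem.List.sorted p (fun c => c) false with hsdef
  have hperm : s.Perm p := PySem.List.sorted_perm p (fun c => c) false
  have hsne : s ≠ [] := by
    intro h
    have h2 := hperm
    rw [h] at h2
    exact hp h2.symm.eq_nil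
  rcases List.eq_nil_or_concat s with h | ⟨s', c, hsc⟩
  · exact absurd h hsne
  rw [List.concat_eq_append] at hsc
  have hpair : (s' ++ [c]).Pairwise (· ≤ ·) := by
    rw [← hsc]
    simpa using PySem.List.sorted_pairwise p (fun c => c)
  obtain ⟨W, hfold, hWlt, hWmem⟩ := pvScan_inv s' c hpair
  have hfold' : (s.foldl pvStep ((0 : Int), (0 : Int), (none : Option Char), ([] : List Char))).2.2.2 = W := by
    rw [hsc, hfold]
  rw [hfold']
  have hcnt : ∀ x, s.count x = p.count x := fun x => hperm.count_eq x
  have hMN : pvMN s = pvMN p := by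
    apply pvMN_eq
    · intro x hx
      rw [hcnt x]
      exact pvMN_le p x (hperm.mem_iff.1 hx)
    · obtain ⟨y, hy, hyc⟩ := pvMN_exists p hp
      exact ⟨y, hperm.mem_iff.2 hy, by rw [hcnt y]; exact hyc⟩
  apply PySem.List.sorted_eq_of_perm_of_pairwise_lt
  · rw [List.perm_ext_iff_of_nodup (List.Pairwise.imp (fun h => ne_of_lt h) hWlt) (PySem.Set.nodup_ofList _)]
    intro x
    rw [hWmem x, ← hsc, PySem.Set.mem_ofList, List.mem_filter, pvMaxD_eq p hp]
    rw [hperm.mem_iff, hcnt x]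
    constructor
    · rintro ⟨hx, hc⟩
      exact ⟨hx, by simp only [beq_iff_eq]; exact_mod_cast congrArg (Nat.cast : Nat → Int) (hc.trans hMN)⟩
    · rintro ⟨hx, hc⟩
      simp only [beq_iff_eq] at hc
      exact ⟨hx, by rw [hMN]; exact_mod_cast hc⟩
  · exact hWlt

-- A's canonical per-column selection equals B's per-column scan output
theorem pvSelect_eq_scan (p : List Char) (hp : p ≠ []) :
    pvSelect p = PySem.Chars.join ['/']
      ((((PySem.List.sorted p (fun c => c) false).foldl pvStep
          ((0 : Int), (0 : Int), (none : Option Char), ([] : List Char))).2.2.2).map (fun c => [c])) := by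
  simp only [pvSelect]
  rw [pvScan_winners p hp]

-- ===== VERDICT (by name: the statement is the Claim_ definition above) =====
theorem get_consensus_generic_spec : Claim_equal_get_consensus_generic := by
  intro ss _
  unfold Spec_get_consensus_generic
  simp only [get_consensus_generic, get_consensus_generic_alt]
  set lines : List (List Char) := ((PySem.Str.split? ss "\n").getD []).map String.toList with hlines
  apply congrArg
  apply congrArg
  set d : PySem.Dict Int (List Char) := lines.foldl (fun d x =>
      (PySem.List.pyRange 0 (x.length : Int)).foldl (fun d y =>
        match PySem.List.pyGet? x y with
        | some ch =>
            if d.contains y then d.insert y (d.getD y [] ++ [PySem.Chars.upperChar ch])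
            else d.insert y [PySem.Chars.upperChar ch]
        | none => d) d) PySem.Dict.empty with hd
  have hkeys : d.keys = List.map Int.ofNat (List.range (pvWidth lines)) := by
    rw [hd]
    rw [pvBuild_keys_gen lines PySem.Dict.empty 0 (by simp [PySem.Dict.keys_empty])]
    rfl
  have hnd : d.keys.Nodup := by
    rw [hkeys]
    exact List.nodup_range.map (fun a b h => Int.ofNat.inj h)
  rw [PySem.List.foldl_append_eq_flatMap, List.nil_append,
      PySem.Dict.items_eq_map_keys d hnd [], hkeys, List.flatMap_map, List.flatMap_map]
  have hA : ∀ col ∈ List.range (pvWidth lines),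
      pvCo ((d.getD (Int.ofNat col) [])) = [pvSelect (pvColumn lines (col : Int))] := by
    intro col hcol
    have hgd : d.getD (Int.ofNat col) [] = pvColumn lines (col : Int) := by
      rw [Int.ofNat_eq_natCast, hd, pvBuild_getD lines col PySem.Dict.empty,
          PySem.Dict.getD_empty, List.nil_append]
    rw [hgd]
    exact pvCo_eq_select _ (pvColumn_ne_nil lines col (List.mem_range.1 hcol))
  rw [List.flatMap_def, List.map_congr_left hA, ← List.flatMap_def]
  rw [← List.flatMap_map (fun a : Nat => pvSelect (pvColumn lines (a : Int)))
        (fun y : List Char => [y]) (List.range (pvWidth lines)),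
      List.flatMap_singleton']
  rw [pvWidth_eq lines, PySem.List.pyRange_zero_natCast, List.foldl_map,
      PySem.List.foldl_append_singleton_eq_map, List.nil_append]
  refine List.map_congr_left (fun a ha => ?_)
  rw [pvSelect_eq_scan _ (pvColumn_ne_nil lines a (List.mem_range.1 ha))]
  rfl
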